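-- pv_equiv track=rewrite | github.com/vaduxam1/LR_PARAM | lr_lib/gui/widj/highlight_text.py | join_indxs
-- ===== SOURCE A (Python) =====
-- def join_indxs(indxs: {int, }) -> iter((int, int),):
--     '''объединить идущие подряд индексы: (3, 4, 10, 7, 9, 2, 10) -> (2, 4), (7, 7), (9, 10)'''
--     index, *indexs = sorted(indxs)
--     i_end = i_start = index
--
--     for index in indexs:
--         if index != (i_end + 1):
--             yield i_start, i_end
--             i_start = index
--         i_end = index
--     else:
--         yield i_start, i_end
-- ===== SOURCE B (Python) =====
-- from itertools import groupby
--
--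
-- def join_indxs(indxs):
--     '''объединить идущие подряд индексы: (3, 4, 10, 7, 9, 2, 10) -> (2, 4), (7, 7), (9, 10)'''
--     # v - i is constant exactly on a maximal run of consecutive values in the
--     # sorted order, so groupby over enumerate(sorted(...)) cuts the runs out.
--     for _, run in groupby(enumerate(sorted(indxs)), key=lambda iv: iv[1] - iv[0]):
--         run = list(run)
--         yield run[0][1], run[-1][1]
-- ===== Notes on version B (the rewrite author's own statement) =====
-- stated objective: idiomatic
-- what changed: A carries (i_start, i_end) state through one explicit loop and emits an interval at each break plus a trailing yield; B has no run state at all: it groups enumerate(sorted(indxs)) with itertools.groupby on the key v - i (constant exactly on a run of consecutive values) and yields (first, last) of each group.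
import Mathlib
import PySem

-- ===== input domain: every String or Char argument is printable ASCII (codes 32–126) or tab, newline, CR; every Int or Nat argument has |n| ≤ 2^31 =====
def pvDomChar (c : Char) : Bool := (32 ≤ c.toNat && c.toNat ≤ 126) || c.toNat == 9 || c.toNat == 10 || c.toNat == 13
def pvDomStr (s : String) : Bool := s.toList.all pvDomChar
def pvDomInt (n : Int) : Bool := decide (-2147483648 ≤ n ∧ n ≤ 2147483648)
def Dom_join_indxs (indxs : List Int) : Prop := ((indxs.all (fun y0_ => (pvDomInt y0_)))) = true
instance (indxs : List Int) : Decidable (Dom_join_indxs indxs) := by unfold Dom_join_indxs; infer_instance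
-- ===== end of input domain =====

-- B replaces A's stateful fold (i_start/i_end carried, emit at break + trailing yield) by
-- itertools.groupby over enumerate(sorted(indxs)) keyed on v - i; idiomatic alternative, same cost.
-- On the empty list A raises ValueError; Pre_ excludes it (B returns [] there).


-- ===== PORT A =====
-- body of A's for-loop: if index != i_end + 1 yield (i_start, i_end) and reset i_start; then i_end = index
def stepA (st : List (Int × Int) × Int × Int) (idx : Int) : List (Int × Int) × Int × Int :=
  if idx ≠ st.2.2 + 1 then (st.1 ++ [(st.2.1, st.2.2)], idx, idx)
  else (st.1, st.2.1, idx)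

-- literal port of A: sort, unpack head (on [] Python raises ValueError — excluded by Pre_),
-- fold over the tail carrying (yielded-so-far, i_start, i_end), trailing yield appended.
def join_indxs (indxs : List Int) : List (Int × Int) :=
  match PySem.List.sorted indxs (fun x => x) false with
  | [] => []  -- Python raises ValueError here (star-unpacking); excluded by Pre_join_indxs
  | index :: indexs =>
    let r := indexs.foldl stepA ([], index, index)
    r.1 ++ [(r.2.1, r.2.2)]

-- ===== PORT B =====
-- hand port of itertools.groupby (exact for this use: split into maximal runs of
-- consecutive elements with equal key iv.2 - iv.1, each group materialised as a list)
def pvGroupBy : List (Int × Int) → List (List (Int × Int))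
  | [] => []
  | x :: xs =>
    (x :: xs.takeWhile (fun y => y.2 - y.1 = x.2 - x.1)) ::
      pvGroupBy (xs.dropWhile (fun y => y.2 - y.1 = x.2 - x.1))
termination_by l => l.length
decreasing_by simpa using Nat.lt_succ_of_le (List.length_dropWhile_le _ _)

-- per group: yield run[0][1], run[-1][1]  (groups are never empty; default never read)
def join_indxs_alt (indxs : List Int) : List (Int × Int) :=
  (pvGroupBy (PySem.List.enumerate (PySem.List.sorted indxs (fun x => x) false))).map
    (fun run => ((run.headD (0, 0)).2, (run.getLastD (0, 0)).2))

-- ===== PRECONDITION & SPEC =====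
-- Pre_ excludes only the empty list, on which Python A raises ValueError.
def Pre_join_indxs (indxs : List Int) : Prop := indxs ≠ []
instance (indxs : List Int) : Decidable (Pre_join_indxs indxs) := by unfold Pre_join_indxs; infer_instance
def pvWitness_join_indxs : List Int := [3, 4, 10, 7, 9, 2, 10]

def Spec_join_indxs (indxs : List Int) (out : List (Int × Int)) : Prop := out = join_indxs_alt indxs
instance (indxs : List Int) (out : List (Int × Int)) : Decidable (Spec_join_indxs indxs out) := by unfold Spec_join_indxs; infer_instance

-- ===== CLAIM (what is proved, stated in full; the proofs are below) =====
def Claim_equal_join_indxs : Prop := ∀ (indxs : List Int), Dom_join_indxs indxs → Pre_join_indxs indxs → Spec_join_indxs indxs (join_indxs indxs)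

-- ===== LEMMAS AND PROOFS =====

-- Characterisation of A's loop: intervals emitted from state (st, en) over the remaining tail.
def joinFrom (st en : Int) : List Int → List (Int × Int)
  | [] => [(st, en)]
  | v :: vs => if v ≠ en + 1 then (st, en) :: joinFrom v v vs else joinFrom st v vs

def runs : List Int → List (Int × Int)
  | [] => []
  | x :: xs => joinFrom x x xs

theorem foldA_eq_joinFrom (xs : List Int) : ∀ (acc : List (Int × Int)) (st en : Int),
    (xs.foldl stepA (acc, st, en)).1
      ++ [((xs.foldl stepA (acc, st, en)).2.1, (xs.foldl stepA (acc, st, en)).2.2)]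
      = acc ++ joinFrom st en xs := by
  induction xs with
  | nil => intro acc st en; simp [joinFrom]
  | cons v vs ih =>
    intro acc st en
    simp only [List.foldl_cons, joinFrom, stepA]
    by_cases h : v = en + 1
    · rw [if_neg (by simp [h]), if_neg (by simp [h])]; exact ih acc st v
    · rw [if_pos (by simpa using h), if_pos (by simpa using h)]
      rw [ih (acc ++ [(st, en)]) v v]; simp

theorem joinA_eq_runs (indxs : List Int) (h : PySem.List.sorted indxs (fun x => x) false ≠ []) :
    join_indxs indxs = runs (PySem.List.sorted indxs (fun x => x) false) := by
  cases hs : PySem.List.sorted indxs (fun x => x) false with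
  | nil => exact absurd hs h
  | cons x xs =>
    simp only [join_indxs, hs, runs]
    have := foldA_eq_joinFrom xs [] x x
    simpa using this

-- key step for B: one groupby group plus the rest equals joinFrom on the tail
theorem joinFrom_group (l : List Int) : ∀ (n en st : Int),
    joinFrom st en l =
      (st, (((n - 1, en) ::
          (PySem.List.enumerate l n).takeWhile (fun y => y.2 - y.1 = en - (n - 1))).getLastD (0, 0)).2)
        :: (pvGroupBy ((PySem.List.enumerate l n).dropWhile (fun y => y.2 - y.1 = en - (n - 1)))).map
            (fun run => ((run.headD (0, 0)).2, (run.getLastD (0, 0)).2)) := by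
  induction l with
  | nil => intro n en st; simp [joinFrom, PySem.List.enumerate_nil, pvGroupBy]
  | cons v vs ih =>
    intro n en st
    rw [PySem.List.enumerate_cons]
    by_cases h : v = en + 1
    · have hc : ((n, v).2 - (n, v).1 = en - (n - 1)) := by simp; omega
      rw [List.takeWhile_cons_of_pos (by simpa using hc),
          List.dropWhile_cons_of_pos (by simpa using hc)]
      have hk : en - (n - 1) = v - (n + 1 - 1) := by omega
      rw [joinFrom, if_neg (by simpa using h), ih (n + 1) v st, hk]
      simp only [List.getLastD_cons]
      norm_num
    · have hc : ¬ ((n, v).2 - (n, v).1 = en - (n - 1)) := by simp; omega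
      rw [List.takeWhile_cons_of_neg (by simpa using hc),
          List.dropWhile_cons_of_neg (by simpa using hc)]
      rw [joinFrom, if_pos (by simpa using h)]
      rw [pvGroupBy, List.map_cons]
      rw [ih (n + 1) v v]
      simp only [List.getLastD_cons]
      norm_num

theorem alt_eq_runs (s : List Int) :
    (pvGroupBy (PySem.List.enumerate s 0)).map
      (fun run => ((run.headD (0, 0)).2, (run.getLastD (0, 0)).2)) = runs s := by
  cases s with
  | nil => simp [PySem.List.enumerate_nil, pvGroupBy, runs]
  | cons x xs =>
    rw [PySem.List.enumerate_cons, pvGroupBy, List.map_cons, runs]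
    rw [joinFrom_group xs 1 x x]
    simp only [List.getLastD_cons]
    norm_num

theorem sorted_ne_nil (indxs : List Int) (h : indxs ≠ []) :
    PySem.List.sorted indxs (fun x => x) false ≠ [] := by
  intro hc
  have := PySem.List.sorted_perm indxs (fun x : Int => x) false
  rw [hc] at this
  exact h this.symm.eq_nil

-- ===== VERDICT (by name: the statement is the Claim_ definition above) =====
theorem join_indxs_spec : Claim_equal_join_indxs := by
  intro indxs _ hpre
  unfold Spec_join_indxs join_indxs_alt
  rw [joinA_eq_runs indxs (sorted_ne_nil indxs hpre), alt_eq_runs]
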